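-- pv_equiv track=rewrite | github.com/abadithela/Winning_set_synthesis | stochastic_games.py | pre
-- ===== SOURCE A (Python) =====
-- def pre(GVp, GEdges, W0, U, qual1, qual2, qual3):
--     if not GVp: # 2-player game winning set
--         # Simple backward reachability:
--         env_W0 = W0[0].copy() # First row of W0 has env action nodes in winning set
--         sys_W0 = W0[1].copy() # Second row of W0 has sys action nodes in winning set
--         Win1 = [] # Winning set containing environment action states
--         Win2 = [] # Winning set containing system action states
--         Win = [] # Winning set containing env winning actions in the first row and sys winning actions in the second row
--
--         # Backward reachability for winning set with environment action state
--         for env_win in env_W0: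
--             end_node = [row[1] for row in GEdges]
--             env_win_idx = [ii for ii, x in enumerate(end_node) if x==env_win]
--             start_node = [row[0] for row in GEdges] # Extracting the first column in G.Edges
--             env_nbr = [start_node[ii] for ii in env_win_idx]
--             if env_nbr: # If list is not empty
--                 for env_nbr_elem in env_nbr:
--                     if env_nbr_elem not in U:  # Not in unsafe set
--                         Win2.append(env_nbr_elem)
--
--         # Backward reachability for winning set with system action state. All environment actions must lead to a winning state
--         for sys_win in sys_W0:
--             end_node = [row[1] for row in GEdges]
--             potential_sys_win_idx = [ii for ii, x in enumerate(end_node) if x==sys_win]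
--             start_node = [row[0] for row in GEdges] # Extracting the first column in G.Edges
--             potential_sys_nbr = [start_node[ii] for ii in potential_sys_win_idx]
--             sys_nbr = []
--             for potential_nbr in potential_sys_nbr:
--                 if potential_nbr not in U:
--                     potential_nbr_idx = [ii for ii, x in enumerate(start_node) if x==potential_nbr]
--                     potential_nbr_end_node = [end_node[ii] for ii in potential_nbr_idx]
--                     if set(potential_nbr_end_node) <= set(sys_W0):
--                         sys_nbr.extend([potential_nbr])
--
--             Win1.extend(sys_nbr)
--         Win1 = list(dict.fromkeys(Win1)) # Removes duplicates
--         Win2 = list(dict.fromkeys(Win2)) # Removes duplicates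
--         Win.append(Win1)
--         Win.append(Win2)
--
--     else: # Find sure, almost-sure and positive winning sets
--         Win=[]
--     return Win
-- ===== SOURCE B (Python) =====
-- def pre(GVp, GEdges, W0, U, qual1, qual2, qual3):
--     if GVp:
--         return []
--     env_W0 = W0[0]
--     sys_W0 = W0[1]
--     # one pass over the edges: predecessor and successor adjacency maps
--     pred = {}
--     succ = {}
--     for row in GEdges:
--         u, v = row[0], row[1]
--         pred.setdefault(v, []).append(u)
--         succ.setdefault(u, []).append(v)
--     sys_targets = set(sys_W0)
--     Win1 = list(dict.fromkeys(
--         u for v in sys_W0 for u in pred.get(v, [])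
--         if u not in U and all(w in sys_targets for w in succ.get(u, []))))
--     Win2 = list(dict.fromkeys(
--         u for v in env_W0 for u in pred.get(v, [])
--         if u not in U))
--     return [Win1, Win2]
-- ===== Notes on version B (the rewrite author's own statement) =====
-- stated objective: alternative
-- what changed: Instead of rescanning the whole edge list for every winning node (and again for every candidate neighbour in the subset test), B builds predecessor and successor adjacency maps in one pass over the edges and answers each neighbour query with a dict lookup.
-- outside the precondition, e.g. on pre([], [[2]], [[], []], [], 0, 0, 0): A returns [[], []], B raises IndexError
import Mathlib
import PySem

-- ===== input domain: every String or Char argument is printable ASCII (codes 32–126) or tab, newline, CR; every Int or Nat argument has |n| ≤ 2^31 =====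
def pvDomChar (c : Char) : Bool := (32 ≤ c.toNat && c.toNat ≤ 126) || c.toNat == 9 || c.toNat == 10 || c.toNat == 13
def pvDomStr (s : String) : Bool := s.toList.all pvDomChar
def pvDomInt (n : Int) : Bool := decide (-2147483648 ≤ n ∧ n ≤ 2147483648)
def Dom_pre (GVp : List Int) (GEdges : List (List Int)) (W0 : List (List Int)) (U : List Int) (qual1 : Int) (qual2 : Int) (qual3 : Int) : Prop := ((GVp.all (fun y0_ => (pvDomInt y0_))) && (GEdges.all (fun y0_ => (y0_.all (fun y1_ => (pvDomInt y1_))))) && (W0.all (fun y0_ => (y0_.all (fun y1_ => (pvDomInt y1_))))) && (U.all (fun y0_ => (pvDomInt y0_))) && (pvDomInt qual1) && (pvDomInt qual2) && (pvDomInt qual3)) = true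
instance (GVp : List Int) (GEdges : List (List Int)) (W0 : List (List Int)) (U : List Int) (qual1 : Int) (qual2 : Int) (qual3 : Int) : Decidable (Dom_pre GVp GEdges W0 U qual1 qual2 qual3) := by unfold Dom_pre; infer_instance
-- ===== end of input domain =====

-- B replaces A's repeated edge-list scans (one per winning node, plus one per candidate
-- neighbour for the subset test) by predecessor/successor adjacency maps built in one pass
-- over the edges, then dict lookups; objective: alternative.

-- ===== PORT A =====
def pre (GVp : List Int) (GEdges : List (List Int)) (W0 : List (List Int)) (U : List Int) (qual1 : Int) (qual2 : Int) (qual3 : Int) : List (List Int) :=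
  if GVp = [] then
    let env_W0 := PySem.List.pyGetD W0 0 []      -- W0[0] (in range under Pre_pre)
    let sys_W0 := PySem.List.pyGetD W0 1 []      -- W0[1] (in range under Pre_pre)
    -- Backward reachability for winning set with environment action state
    let Win2 : List Int := env_W0.foldl (fun Win2 env_win =>
      let end_node := GEdges.map (fun row => PySem.List.pyGetD row 1 0)
      let env_win_idx := (PySem.List.enumerate end_node 0).filterMap
        (fun p => if p.2 == env_win then some p.1 else none)
      let start_node := GEdges.map (fun row => PySem.List.pyGetD row 0 0)
      let env_nbr := env_win_idx.map (fun ii => PySem.List.pyGetD start_node ii 0)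
      if env_nbr ≠ [] then
        env_nbr.foldl (fun Win2 env_nbr_elem =>
          if !U.contains env_nbr_elem then Win2 ++ [env_nbr_elem] else Win2) Win2
      else Win2) []
    -- Backward reachability for winning set with system action state
    let Win1 : List Int := sys_W0.foldl (fun Win1 sys_win =>
      let end_node := GEdges.map (fun row => PySem.List.pyGetD row 1 0)
      let potential_sys_win_idx := (PySem.List.enumerate end_node 0).filterMap
        (fun p => if p.2 == sys_win then some p.1 else none)
      let start_node := GEdges.map (fun row => PySem.List.pyGetD row 0 0)
      let potential_sys_nbr := potential_sys_win_idx.map (fun ii => PySem.List.pyGetD start_node ii 0)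
      let sys_nbr : List Int := potential_sys_nbr.foldl (fun sys_nbr potential_nbr =>
        if !U.contains potential_nbr then
          let potential_nbr_idx := (PySem.List.enumerate start_node 0).filterMap
            (fun p => if p.2 == potential_nbr then some p.1 else none)
          let potential_nbr_end_node := potential_nbr_idx.map (fun ii => PySem.List.pyGetD end_node ii 0)
          if PySem.Set.issubset (PySem.Set.ofList potential_nbr_end_node) (PySem.Set.ofList sys_W0) then
            sys_nbr ++ [potential_nbr]
          else sys_nbr
        else sys_nbr) []
      Win1 ++ sys_nbr) []
    let Win1 := PySem.List.dedup Win1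
    let Win2 := PySem.List.dedup Win2
    [Win1, Win2]
  else []

-- ===== PORT B =====
def pre_alt (GVp : List Int) (GEdges : List (List Int)) (W0 : List (List Int)) (U : List Int) (qual1 : Int) (qual2 : Int) (qual3 : Int) : List (List Int) :=
  if GVp ≠ [] then []
  else
    let env_W0 := PySem.List.pyGetD W0 0 []
    let sys_W0 := PySem.List.pyGetD W0 1 []
    -- one pass over the edges: predecessor and successor adjacency maps
    let pred : PySem.Dict Int (List Int) := GEdges.foldl
      (fun d row => d.modify (PySem.List.pyGetD row 1 0) [] (· ++ [PySem.List.pyGetD row 0 0]))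
      PySem.Dict.empty
    let succ : PySem.Dict Int (List Int) := GEdges.foldl
      (fun d row => d.modify (PySem.List.pyGetD row 0 0) [] (· ++ [PySem.List.pyGetD row 1 0]))
      PySem.Dict.empty
    let sys_targets := PySem.Set.ofList sys_W0
    let Win1 := PySem.List.dedup (sys_W0.flatMap (fun v =>
      (pred.getD v []).filter (fun u =>
        !U.contains u && (succ.getD u []).all (fun w => PySem.Set.contains sys_targets w))))
    let Win2 := PySem.List.dedup (env_W0.flatMap (fun v =>
      (pred.getD v []).filter (fun u => !U.contains u)))
    [Win1, Win2]

-- ===== PRECONDITION & SPEC =====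
-- Pre_pre excludes the inputs where Python A raises an IndexError (with GVp empty it reads
-- W0[0], W0[1] and, inside its loops, row[0]/row[1] of every edge row) and, for the same
-- well-formed-edge-row condition, the inputs where A happens to return only because both W0
-- rows are empty and its loops never touch the malformed edge rows that B's one-pass
-- adjacency-map build must read (B raises there).
def Pre_pre (GVp : List Int) (GEdges : List (List Int)) (W0 : List (List Int)) (U : List Int) (qual1 : Int) (qual2 : Int) (qual3 : Int) : Prop :=
  GVp ≠ [] ∨ (W0 ≠ [] ∧ W0.tail ≠ [] ∧ ∀ row ∈ GEdges, row ≠ [] ∧ row.tail ≠ [])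
instance (GVp : List Int) (GEdges : List (List Int)) (W0 : List (List Int)) (U : List Int) (qual1 : Int) (qual2 : Int) (qual3 : Int) : Decidable (Pre_pre GVp GEdges W0 U qual1 qual2 qual3) := by unfold Pre_pre; infer_instance
def pvWitness_pre : List Int × List (List Int) × List (List Int) × List Int × Int × Int × Int :=
  ([], [[1, 2], [2, 3]], [[3], [2]], [1], 0, 0, 0)
def Spec_pre (GVp : List Int) (GEdges : List (List Int)) (W0 : List (List Int)) (U : List Int) (qual1 : Int) (qual2 : Int) (qual3 : Int) (out : List (List Int)) : Prop := out = pre_alt GVp GEdges W0 U qual1 qual2 qual3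
instance (GVp : List Int) (GEdges : List (List Int)) (W0 : List (List Int)) (U : List Int) (qual1 : Int) (qual2 : Int) (qual3 : Int) (out : List (List Int)) : Decidable (Spec_pre GVp GEdges W0 U qual1 qual2 qual3 out) := by unfold Spec_pre; infer_instance

-- ===== CLAIM (what is proved, stated in full; the proofs are below) =====
def Claim_equal_pre : Prop := ∀ (GVp : List Int) (GEdges : List (List Int)) (W0 : List (List Int)) (U : List Int) (qual1 : Int) (qual2 : Int) (qual3 : Int), Dom_pre GVp GEdges W0 U qual1 qual2 qual3 → Pre_pre GVp GEdges W0 U qual1 qual2 qual3 → Spec_pre GVp GEdges W0 U qual1 qual2 qual3 (pre GVp GEdges W0 U qual1 qual2 qual3)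

-- ===== LEMMAS AND PROOFS =====

-- W0[pre.length] in a list split as pre ++ a :: s' is a
theorem pv_getD_append_length (pre : List Int) (a : Int) (s' : List Int) :
    PySem.List.pyGetD (pre ++ a :: s') (pre.length : Int) 0 = a := by
  simp [PySem.List.pyGetD]

-- A's "select the indices where e matches v, then read s at those indices" is a zip-filter
theorem pv_sel_aux (v : Int) (e : List Int) : ∀ (s pre : List Int), e.length ≤ s.length →
    ((PySem.List.enumerate e (pre.length : Int)).filterMap
        (fun p => if p.2 == v then some p.1 else none)).map
      (fun ii => PySem.List.pyGetD (pre ++ s) ii 0)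
    = ((s.zip e).filter (fun p => p.2 == v)).map (·.1) := by
  induction e with
  | nil => intro s pre _; simp [PySem.List.enumerate_nil]
  | cons x e' ih =>
    intro s pre h
    cases s with
    | nil => simp at h
    | cons a s' =>
      rw [PySem.List.enumerate_cons]
      have hc : (pre.length : Int) + 1 = ((pre ++ [a]).length : Int) := by simp
      have happ : pre ++ a :: s' = (pre ++ [a]) ++ s' := by simp
      have ih' := ih s' (pre ++ [a]) (by simpa using h)
      by_cases hx : (x == v) = true
      · simp only [List.filterMap_cons, hx, if_pos, List.map_cons, List.zip_cons_cons,
          List.filter_cons, pv_getD_append_length]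
        rw [hc, happ, ih']
      · simp only [List.filterMap_cons, hx, if_neg, Bool.false_eq_true, not_false_iff,
          List.zip_cons_cons, List.filter_cons]
        rw [hc, happ, ih']

theorem pv_sel (v : Int) (e s : List Int) (h : e.length ≤ s.length) :
    ((PySem.List.enumerate e 0).filterMap (fun p => if p.2 == v then some p.1 else none)).map
      (fun ii => PySem.List.pyGetD s ii 0)
    = ((s.zip e).filter (fun p => p.2 == v)).map (·.1) := by
  simpa using pv_sel_aux v e s [] h

-- the common normal form of a predecessor/successor list: filter the edge rows, project
theorem pv_adj (G : List (List Int)) (f g : List Int → Int) (v : Int) :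
    (((G.map g).zip (G.map f)).filter (fun p => p.2 == v)).map (·.1)
    = (G.filter (fun row => f row == v)).map g := by
  rw [List.zip_map', List.filter_map]
  simp [List.map_map, Function.comp_def]

-- B's adjacency dict, looked up, is the same normal form
theorem pv_dict (G : List (List Int)) (f g : List Int → Int) (v : Int) :
    (G.foldl (fun d row => d.modify (f row) [] (· ++ [g row])) PySem.Dict.empty).getD v []
    = (G.filter (fun row => f row == v)).map g := by
  have h : G.foldl (fun d row => d.modify (f row) [] (· ++ [g row])) PySem.Dict.empty
      = (G.map (fun row => (f row, g row))).foldl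
          (fun d p => d.modify p.1 [] (· ++ [p.2])) PySem.Dict.empty := by
    rw [List.foldl_map]
  rw [h, PySem.Dict.getD_foldl_modify_append, List.filter_map]
  simp [List.map_map, Function.comp_def]

-- A's enumerate-based neighbour list = B's dict lookup, in one step
theorem pv_nbr (G : List (List Int)) (f g : List Int → Int) (v : Int) :
    ((PySem.List.enumerate (G.map f) 0).filterMap
        (fun p => if p.2 == v then some p.1 else none)).map
      (fun ii => PySem.List.pyGetD (G.map g) ii 0)
    = (G.foldl (fun d row => d.modify (f row) [] (· ++ [g row])) PySem.Dict.empty).getD v [] := by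
  rw [pv_sel v (G.map f) (G.map g) (by simp), pv_adj, pv_dict]

-- all over a Python set(xs) is all over xs
theorem pv_all_ofList (l : List Int) (p : Int → Bool) :
    (PySem.Set.ofList l).all p = l.all p := by
  rw [Bool.eq_iff_iff]
  simp only [List.all_eq_true]
  constructor
  · intro h x hx; exact h x ((PySem.Set.mem_ofList l x).mpr hx)
  · intro h x hx; exact h x ((PySem.Set.mem_ofList l x).mp hx)

-- loop shapes: A's guarded append loop / nested-if loop, as flatMap-of-filter
theorem pv_loop_if (nbrf : Int → List Int) (p : Int → Bool) (L : List Int) :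
    L.foldl (fun acc v => if nbrf v ≠ [] then
        (nbrf v).foldl (fun a u => if p u then a ++ [u] else a) acc
      else acc) []
    = L.flatMap (fun v => (nbrf v).filter p) := by
  have hf : (fun (acc : List Int) v => if nbrf v ≠ [] then
        (nbrf v).foldl (fun a u => if p u then a ++ [u] else a) acc else acc)
      = fun acc v => acc ++ (nbrf v).filter p := by
    funext acc v
    by_cases h : nbrf v = []
    · simp [h]
    · simp only [h, ne_eq, not_false_iff, if_true]
      simpa using PySem.List.foldl_append_if p id (nbrf v) acc
  rw [hf, PySem.List.foldl_append_eq_flatMap]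
  simp

theorem pv_loop_nested (nbrf : Int → List Int) (p q : Int → Bool) (L : List Int) :
    L.foldl (fun acc v => acc ++
        (nbrf v).foldl (fun a u => if p u then (if q u then a ++ [u] else a) else a) []) []
    = L.flatMap (fun v => (nbrf v).filter (fun u => p u && q u)) := by
  have hfun : (fun (acc : List Int) v => acc ++
        (nbrf v).foldl (fun a u => if p u then (if q u then a ++ [u] else a) else a) [])
      = fun acc v => acc ++ (nbrf v).filter (fun u => p u && q u) := by
    funext acc v
    have hinner : (fun (a : List Int) u => if p u then (if q u then a ++ [u] else a) else a)
        = fun a u => if (p u && q u) then a ++ [u] else a := by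
      funext a u
      by_cases hp : p u = true <;> by_cases hq : q u = true <;> simp [hp, hq]
    rw [hinner]
    simpa using PySem.List.foldl_append_if (fun u => p u && q u) id (nbrf v) []
  rw [hfun, PySem.List.foldl_append_eq_flatMap]
  simp

-- ===== VERDICT (by name: the statement is the Claim_ definition above) =====
theorem pre_spec : Claim_equal_pre := by
  intro GVp GEdges W0 U qual1 qual2 qual3 _ _
  unfold Spec_pre pre pre_alt
  by_cases hG : GVp = []
  · simp only [hG, if_true, ne_eq, not_true_eq_false, if_false]
    rw [pv_loop_if (fun v =>
        ((PySem.List.enumerate (GEdges.map (fun row => PySem.List.pyGetD row 1 0)) 0).filterMap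
            (fun p => if p.2 == v then some p.1 else none)).map
          (fun ii => PySem.List.pyGetD (GEdges.map (fun row => PySem.List.pyGetD row 0 0)) ii 0))
      (fun u => !U.contains u) (PySem.List.pyGetD W0 0 [])]
    rw [pv_loop_nested (fun v =>
        ((PySem.List.enumerate (GEdges.map (fun row => PySem.List.pyGetD row 1 0)) 0).filterMap
            (fun p => if p.2 == v then some p.1 else none)).map
          (fun ii => PySem.List.pyGetD (GEdges.map (fun row => PySem.List.pyGetD row 0 0)) ii 0))
      (fun u => !U.contains u)
      (fun u => PySem.Set.issubset (PySem.Set.ofList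
          (((PySem.List.enumerate (GEdges.map (fun row => PySem.List.pyGetD row 0 0)) 0).filterMap
              (fun p => if p.2 == u then some p.1 else none)).map
            (fun ii => PySem.List.pyGetD (GEdges.map (fun row => PySem.List.pyGetD row 1 0)) ii 0)))
        (PySem.Set.ofList (PySem.List.pyGetD W0 1 [])))
      (PySem.List.pyGetD W0 1 [])]
    simp only [pv_nbr, PySem.Set.issubset, PySem.Set.contains, pv_all_ofList]
  · simp [hG]
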